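-- pv_equiv track=rewrite | github.com/samuelepapa/neural-field-arena | neural_dataset/utils.py | splits_to_names
-- ===== SOURCE A (Python) =====
-- from typing import Any, Callable, List, Optional, Sequence, Tuple, Union
--
-- def splits_to_names(split_sizes: Union[List[int], List[float]]) -> List[str]:
--     start_idx = 0
--     split_names = []
--     for split_size in split_sizes:
--         end_idx = start_idx + split_size
--         split_names.append(f"{start_idx}_{end_idx}")
--         start_idx = end_idx
--     return split_names
-- ===== SOURCE B (Python) =====
-- def splits_to_names(split_sizes):
--     bounds = [0]
--     for size in split_sizes:
--         bounds.append(bounds[-1] + size)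
--     return [f"{s}_{e}" for s, e in zip(bounds, bounds[1:])]
-- ===== Notes on version B (the rewrite author's own statement) =====
-- stated objective: alternative
-- what changed: Replaces the running-accumulator loop that appends each name as it goes with a two-phase decomposition: first build the full boundary table [0, p1, p2, ...] of prefix sums, then format names in one pairwise zip pass over consecutive boundaries.
import Mathlib
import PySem

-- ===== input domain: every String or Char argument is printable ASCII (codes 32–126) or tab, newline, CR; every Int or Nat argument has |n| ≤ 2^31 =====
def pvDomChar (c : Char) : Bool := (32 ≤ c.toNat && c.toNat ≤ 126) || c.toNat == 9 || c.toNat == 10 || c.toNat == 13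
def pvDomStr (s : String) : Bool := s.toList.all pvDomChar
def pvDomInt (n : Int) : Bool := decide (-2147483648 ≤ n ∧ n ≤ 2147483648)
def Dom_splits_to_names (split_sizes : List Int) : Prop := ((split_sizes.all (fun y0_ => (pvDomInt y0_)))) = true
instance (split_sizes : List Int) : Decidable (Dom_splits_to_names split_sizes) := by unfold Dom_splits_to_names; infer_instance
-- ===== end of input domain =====

-- B builds the full boundary table of prefix sums first and then formats names in a
-- pairwise zip pass, instead of A's single loop with a running start index (return values equal).

-- ===== PORT A =====
-- for split_size in split_sizes: end = start + size; names.append(f"{start}_{end}"); start = end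
def splits_to_names (split_sizes : List Int) : List String :=
  (split_sizes.foldl
    (fun (st : Int × List String) split_size =>
      let end_idx := st.1 + split_size
      (end_idx, st.2 ++ [PySem.Int.toStr st.1 ++ "_" ++ PySem.Int.toStr end_idx]))
    (0, [])).2

-- ===== PORT B =====
-- bounds = [0]; for size: bounds.append(bounds[-1] + size); then zip consecutive boundaries
def splits_to_names_alt (split_sizes : List Int) : List String :=
  let bounds : List Int :=
    split_sizes.foldl (fun acc size => acc ++ [PySem.List.pyGetD acc (-1) 0 + size]) [0]
  (bounds.zip bounds.tail).map (fun p => PySem.Int.toStr p.1 ++ "_" ++ PySem.Int.toStr p.2)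

-- ===== PRECONDITION & SPEC =====
def Spec_splits_to_names (split_sizes : List Int) (out : List String) : Prop := out = splits_to_names_alt split_sizes
instance (split_sizes : List Int) (out : List String) : Decidable (Spec_splits_to_names split_sizes out) := by unfold Spec_splits_to_names; infer_instance

-- ===== CLAIM (what is proved, stated in full; the proofs are below) =====
def Claim_equal_splits_to_names : Prop := ∀ (split_sizes : List Int), Dom_splits_to_names split_sizes → Spec_splits_to_names split_sizes (splits_to_names split_sizes)

-- ===== LEMMAS AND PROOFS =====

/-- Reference recursion: the names starting from offset `s`. -/
def namesFrom (s : Int) : List Int → List String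
  | [] => []
  | x :: xs => (PySem.Int.toStr s ++ "_" ++ PySem.Int.toStr (s + x)) :: namesFrom (s + x) xs

/-- Reference recursion: the prefix-sum boundaries after offset `s` (exclusive of `s`). -/
def boundsFrom (s : Int) : List Int → List Int
  | [] => []
  | x :: xs => (s + x) :: boundsFrom (s + x) xs

theorem foldlA_eq_namesFrom (l : List Int) :
    ∀ (s : Int) (acc : List String),
      (l.foldl
        (fun (st : Int × List String) split_size =>
          let end_idx := st.1 + split_size
          (end_idx, st.2 ++ [PySem.Int.toStr st.1 ++ "_" ++ PySem.Int.toStr end_idx]))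
        (s, acc)).2 = acc ++ namesFrom s l := by
  induction l with
  | nil => intro s acc; simp [namesFrom]
  | cons x xs ih =>
      intro s acc
      simp only [List.foldl_cons, namesFrom]
      rw [ih]
      simp

theorem foldlB_eq_boundsFrom (l : List Int) :
    ∀ (b : List Int) (s : Int),
      (l.foldl (fun acc size => acc ++ [PySem.List.pyGetD acc (-1) 0 + size]) (b ++ [s]))
        = b ++ s :: boundsFrom s l := by
  induction l with
  | nil => intro b s; simp [boundsFrom]
  | cons x xs ih =>
      intro b s
      simp only [List.foldl_cons, boundsFrom]
      rw [PySem.List.pyGetD_neg_one_append_singleton]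
      rw [ih (b ++ [s]) (s + x)]
      simp

theorem zip_boundsFrom (l : List Int) :
    ∀ (s : Int),
      (((s :: boundsFrom s l).zip (boundsFrom s l)).map
        (fun p => PySem.Int.toStr p.1 ++ "_" ++ PySem.Int.toStr p.2)) = namesFrom s l := by
  induction l with
  | nil => intro s; simp [boundsFrom, namesFrom]
  | cons x xs ih =>
      intro s
      simp only [boundsFrom, namesFrom, List.zip_cons_cons, List.map_cons]
      exact congrArg _ (ih (s + x))

-- ===== VERDICT (by name: the statement is the Claim_ definition above) =====
theorem splits_to_names_spec : Claim_equal_splits_to_names := by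
  intro l _
  unfold Spec_splits_to_names splits_to_names splits_to_names_alt
  rw [foldlA_eq_namesFrom]
  have hb := foldlB_eq_boundsFrom l [] 0
  simp only [List.nil_append] at hb
  simp only [hb, List.tail_cons, List.nil_append]
  exact (zip_boundsFrom l 0).symm
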